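-- pv_equiv track=rewrite | github.com/garabik/A1 | bin/sentence_stats.py | get_conll_sentence_lengths
-- ===== SOURCE A (Python) =====
-- def get_conll_sentence_lengths(conll):
--     "read lines from conll iterator until an empty line (i.e. sentence break) is encountered"
--     "yield length of the sentence"
--     slen = 0
--     for l in conll:
--         if l.startswith('#'):
--             continue
--         line = l.strip()
--         if line=='':
--             if slen > 0:
--                 yield slen
--                 slen = 0
--         else:
--             slen += 1
--     if slen > 0:
--         yield slen
-- ===== SOURCE B (Python) =====
-- def get_conll_sentence_lengths(conll):
--     "yield sentence lengths: gaps between consecutive blank-line positions in the comment-filtered input"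
--     keys = [l.strip() == '' for l in conll if not l.startswith('#')]
--     bounds = [-1] + [i for i, k in enumerate(keys) if k] + [len(keys)]
--     for a, b in zip(bounds, bounds[1:]):
--         if b - a > 1:
--             yield b - a - 1
-- ===== Notes on version B (the rewrite author's own statement) =====
-- stated objective: alternative
-- what changed: Replaces A's running-counter/reset state machine by computing the positions of blank lines in the comment-filtered input and yielding the gaps (minus one) between consecutive boundary positions.
import Mathlib
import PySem

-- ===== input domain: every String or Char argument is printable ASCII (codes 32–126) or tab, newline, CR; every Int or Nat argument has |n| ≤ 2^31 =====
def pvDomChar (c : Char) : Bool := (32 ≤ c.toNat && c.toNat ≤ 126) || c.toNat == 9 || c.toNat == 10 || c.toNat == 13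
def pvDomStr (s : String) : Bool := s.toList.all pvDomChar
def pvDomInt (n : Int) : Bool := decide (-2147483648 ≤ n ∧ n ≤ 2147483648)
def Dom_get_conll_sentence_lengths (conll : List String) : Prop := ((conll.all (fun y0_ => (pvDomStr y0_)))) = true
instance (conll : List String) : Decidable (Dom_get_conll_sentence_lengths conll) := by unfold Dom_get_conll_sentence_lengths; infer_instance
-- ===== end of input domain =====

-- B replaces A's running-counter state machine by computing blank-line positions in the
-- comment-filtered input and yielding the gaps between consecutive blank positions (objective: alternative).

-- ===== PORT A =====
-- A's generator loop: state slen, yield on blank line and at the end.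
def pvGoA : List String → Int → List Int
  | [], slen => if slen > 0 then [slen] else []
  | l :: rest, slen =>
    if PySem.Str.startswith l "#" then pvGoA rest slen
    else
      let line := PySem.Str.strip l
      if line == "" then
        if slen > 0 then slen :: pvGoA rest 0 else pvGoA rest slen
      else pvGoA rest (slen + 1)

def get_conll_sentence_lengths (conll : List String) : List Int := pvGoA conll 0

-- ===== PORT B =====
def get_conll_sentence_lengths_alt (conll : List String) : List Int :=
  let keys : List Bool :=
    (conll.filter (fun l => !(PySem.Str.startswith l "#"))).map (fun l => PySem.Str.strip l == "")
  let bounds : List Int :=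
    (-1 : Int) :: ((PySem.List.enumerate keys 0).filterMap (fun p => if p.2 then some p.1 else none))
      ++ [(keys.length : Int)]
  (bounds.zip (bounds.drop 1)).filterMap
    (fun p => if p.2 - p.1 > 1 then some (p.2 - p.1 - 1) else none)

-- ===== PRECONDITION & SPEC =====
def Spec_get_conll_sentence_lengths (conll : List String) (out : List Int) : Prop := out = get_conll_sentence_lengths_alt conll
instance (conll : List String) (out : List Int) : Decidable (Spec_get_conll_sentence_lengths conll out) := by unfold Spec_get_conll_sentence_lengths; infer_instance

-- ===== CLAIM (what is proved, stated in full; the proofs are below) =====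
def Claim_equal_get_conll_sentence_lengths : Prop := ∀ (conll : List String), Dom_get_conll_sentence_lengths conll → Spec_get_conll_sentence_lengths conll (get_conll_sentence_lengths conll)

-- ===== LEMMAS AND PROOFS =====

-- the run-length state machine on the boolean key sequence
def pvG : List Bool → Nat → List Int
  | [], c => if c > 0 then [(c : Int)] else []
  | true :: ks, c => if c > 0 then (c : Int) :: pvG ks 0 else pvG ks 0
  | false :: ks, c => pvG ks (c + 1)

def pvKeys (conll : List String) : List Bool :=
  (conll.filter (fun l => !(PySem.Str.startswith l "#"))).map (fun l => PySem.Str.strip l == "")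

-- indices (from offset p) of the true entries
def pvIdxs : Int → List Bool → List Int
  | _, [] => []
  | p, true :: ks => p :: pvIdxs (p + 1) ks
  | p, false :: ks => pvIdxs (p + 1) ks

-- gap extraction over the boundary list b :: idxs ++ [n]
def pvZipGaps : Int → List Int → Int → List Int
  | b, [], n => if n - b > 1 then [n - b - 1] else []
  | b, i :: is, n => (if i - b > 1 then [i - b - 1] else []) ++ pvZipGaps i is n

theorem pvKeys_cons (l : String) (rest : List String) :
    pvKeys (l :: rest) = if PySem.Str.startswith l "#" then pvKeys rest
      else (PySem.Str.strip l == "") :: pvKeys rest := by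
  unfold pvKeys
  rw [List.filter_cons]
  cases h : PySem.Str.startswith l "#" <;> simp

theorem pvGoA_eq_pvG (conll : List String) : ∀ (slen : Int), 0 ≤ slen →
    pvGoA conll slen = pvG (pvKeys conll) slen.toNat := by
  induction conll with
  | nil =>
    intro slen h
    simp only [pvGoA, pvKeys, List.filter_nil, List.map_nil, pvG]
    split_ifs with h1 h2 h2
    · congr 1; omega
    · exfalso; omega
    · exfalso; omega
    · rfl
  | cons l rest ih =>
    intro slen h
    rw [pvKeys_cons]
    simp only [pvGoA]
    by_cases hc : PySem.Str.startswith l "#" = true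
    · rw [if_pos hc, if_pos hc]
      exact ih slen h
    · rw [if_neg hc, if_neg hc]
      by_cases hb : (PySem.Str.strip l == "") = true
      · rw [if_pos hb, hb]
        by_cases hs : slen > 0
        · rw [if_pos hs]
          have ht : slen.toNat > 0 := by omega
          show _ = pvG (true :: pvKeys rest) slen.toNat
          simp only [pvG]
          rw [if_pos ht, ih 0 le_rfl]
          simp only [Int.toNat_zero]
          congr 1
          omega
        · have h0 : slen = 0 := by omega
          subst h0
          rw [if_neg hs]
          show _ = pvG (true :: pvKeys rest) (0 : Int).toNat
          simp only [pvG, Int.toNat_zero]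
          rw [if_neg (by omega : ¬ ((0 : Nat) > 0))]
          simpa using ih 0 le_rfl
      · have hb' : (PySem.Str.strip l == "") = false := by simpa using hb
        rw [if_neg hb, hb']
        show pvGoA rest (slen + 1) = pvG (false :: pvKeys rest) slen.toNat
        simp only [pvG]
        rw [ih (slen + 1) (by omega)]
        congr 1
        omega

theorem pvFilterMap_enumerate (ks : List Bool) : ∀ (p : Int),
    (PySem.List.enumerate ks p).filterMap (fun q => if q.2 then some q.1 else none) = pvIdxs p ks := by
  induction ks with
  | nil => intro p; simp [PySem.List.enumerate_nil, pvIdxs]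
  | cons k ks ih =>
    intro p
    cases k <;> simp [PySem.List.enumerate_cons, pvIdxs, ih]

theorem pvZip_eq_zipGaps (idxs : List Int) : ∀ (b n : Int),
    (((b :: idxs ++ [n]).zip ((b :: idxs ++ [n]).drop 1)).filterMap
      (fun p => if p.2 - p.1 > 1 then some (p.2 - p.1 - 1) else none)) = pvZipGaps b idxs n := by
  induction idxs with
  | nil =>
    intro b n
    show (([b] ++ [n]).zip (([b] ++ [n]).drop 1)).filterMap _ = _
    simp only [List.cons_append, List.nil_append, List.drop_succ_cons, List.drop_zero,
      List.zip_cons_cons, List.zip_nil_right, List.filterMap_cons, List.filterMap_nil, pvZipGaps]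
    split_ifs <;> simp
  | cons i is ih =>
    intro b n
    have h := ih i n
    simp only [List.cons_append, List.drop_succ_cons, List.drop_zero, List.zip_cons_cons,
      List.filterMap_cons] at h ⊢
    rw [h]
    show _ = (if i - b > 1 then [i - b - 1] else []) ++ pvZipGaps i is n
    split_ifs <;> rfl

theorem pvZipGaps_eq_pvG (ks : List Bool) : ∀ (b p n : Int) (c : Nat),
    p = b + 1 + c → n = p + ks.length →
    pvZipGaps b (pvIdxs p ks) n = pvG ks c := by
  induction ks with
  | nil =>
    intro b p n c hp hn
    simp only [List.length_nil, Int.natCast_zero, add_zero] at hn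
    simp only [pvIdxs, pvZipGaps, pvG]
    split_ifs with h1 h2 h2
    · congr 1; omega
    · exfalso; omega
    · exfalso; omega
    · rfl
  | cons k ks ih =>
    intro b p n c hp hn
    have hn' : n = (p + 1) + ks.length := by
      simp only [List.length_cons] at hn
      push_cast at hn ⊢
      omega
    cases k
    · simp only [pvIdxs, pvG]
      exact ih b (p + 1) n (c + 1) (by push_cast; omega) hn'
    · simp only [pvIdxs, pvZipGaps, pvG]
      rw [ih p (p + 1) n 0 (by push_cast; omega) hn']
      by_cases hc : c > 0
      · have hgt : p - b > 1 := by omega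
        rw [if_pos hgt, if_pos hc]
        simp only [List.singleton_append]
        congr 1
        omega
      · have hle : ¬ (p - b > 1) := by omega
        rw [if_neg hle, if_neg hc]
        rfl

-- ===== VERDICT (by name: the statement is the Claim_ definition above) =====
theorem get_conll_sentence_lengths_spec : Claim_equal_get_conll_sentence_lengths := by
  intro conll _
  unfold Spec_get_conll_sentence_lengths get_conll_sentence_lengths get_conll_sentence_lengths_alt
  rw [pvGoA_eq_pvG conll 0 le_rfl]
  simp only [pvFilterMap_enumerate, Int.toNat_zero]
  rw [show ((conll.filter (fun l => !(PySem.Str.startswith l "#"))).map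
        (fun l => PySem.Str.strip l == "")) = pvKeys conll from rfl]
  rw [pvZip_eq_zipGaps]
  exact (pvZipGaps_eq_pvG (pvKeys conll) (-1) 0 ((pvKeys conll).length) 0 (by norm_num)
    (by ring)).symm
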